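-- pv_equiv track=rewrite | github.com/zilale/Software-Assignment-2 | operations/finite_fields_arithmetic/primitive_element_generation.py | remove_leading_zeros
-- ===== SOURCE A (Python) =====
-- def remove_leading_zeros(f):
--     help = 0
--     takel = reversed(f)
--     for i in takel:
--         if i != 0:
--             if help > 0:   return f[:-help]
--             else:       return f
--         help += 1
--     return [0]
-- ===== SOURCE B (Python) =====
-- def remove_leading_zeros(f):
--     # Divide and conquer: strip(xs) returns xs with all trailing zeros removed
--     # (possibly []), by splitting xs in half; if the stripped right half is
--     # nonempty the left half survives whole, otherwise recurse on the left half.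
--     def strip(xs):
--         if len(xs) <= 1:
--             return [] if (not xs or xs[0] == 0) else xs[:]
--         m = len(xs) // 2
--         r = strip(xs[m:])
--         return xs[:m] + r if r else strip(xs[:m])
--     r = strip(f)
--     if not r:
--         return [0]
--     return f if len(r) == len(f) else r
-- ===== Notes on version B (the rewrite author's own statement) =====
-- stated objective: alternative
-- what changed: B strips trailing zeros by a divide-and-conquer recursion that splits the list in half (keep the left half whole if the stripped right half is nonempty, otherwise recurse on the left half), instead of A's reverse-iteration counter with a negative slice.
import Mathlib
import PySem

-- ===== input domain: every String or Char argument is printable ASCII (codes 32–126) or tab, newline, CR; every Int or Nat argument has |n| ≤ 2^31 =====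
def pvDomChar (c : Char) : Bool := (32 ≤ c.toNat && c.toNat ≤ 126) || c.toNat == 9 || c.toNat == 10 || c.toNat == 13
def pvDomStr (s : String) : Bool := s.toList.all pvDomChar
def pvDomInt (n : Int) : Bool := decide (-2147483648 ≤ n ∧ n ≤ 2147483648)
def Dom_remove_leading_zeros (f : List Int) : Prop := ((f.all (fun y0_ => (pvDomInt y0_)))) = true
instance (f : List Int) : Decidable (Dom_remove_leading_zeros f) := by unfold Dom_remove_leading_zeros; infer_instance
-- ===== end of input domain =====

-- B strips trailing zeros by divide and conquer on halves of the list, instead of A's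
-- reverse-iteration counter with a negative slice (objective: alternative algorithm).

-- ===== PORT A =====
-- the 'for i in reversed(f)' loop with accumulator 'help'
def pvGoA (f : List Int) : List Int → Nat → List Int
  | [], _ => [0]
  | i :: rest, help =>
      if i ≠ 0 then
        (if help > 0 then PySem.List.slice f none (some (-(help : Int))) else f)
      else pvGoA f rest (help + 1)

def remove_leading_zeros (f : List Int) : List Int :=
  pvGoA f f.reverse 0

-- ===== PORT B =====
-- strip(xs): xs[m:] with m = len(xs)//2 ≥ 0 is exactly List.drop m, xs[:m] is List.take m,
-- and xs[:] (a copy) is xs itself; 'not xs or xs[0] == 0' matches on the list.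
-- fuel = length only makes the halving recursion structural; it is never exhausted
def pvStrip (fuel : Nat) (xs : List Int) : List Int :=
  match fuel with
  | 0 => []
  | fuel + 1 =>
    if xs.length ≤ 1 then
      match xs with
      | [] => []
      | x :: _ => if x = 0 then [] else xs
    else
      let m := xs.length / 2
      let r := pvStrip fuel (xs.drop m)
      if r ≠ [] then xs.take m ++ r else pvStrip fuel (xs.take m)

def remove_leading_zeros_alt (f : List Int) : List Int :=
  let r := pvStrip f.length f
  if r = [] then [0]
  else if r.length = f.length then f
  else r

-- ===== PRECONDITION & SPEC =====
def Spec_remove_leading_zeros (f : List Int) (out : List Int) : Prop := out = remove_leading_zeros_alt f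
instance (f : List Int) (out : List Int) : Decidable (Spec_remove_leading_zeros f out) := by unfold Spec_remove_leading_zeros; infer_instance

-- ===== CLAIM (what is proved, stated in full; the proofs are below) =====
def Claim_equal_remove_leading_zeros : Prop := ∀ (f : List Int), Dom_remove_leading_zeros f → Spec_remove_leading_zeros f (remove_leading_zeros f)

-- ===== LEMMAS AND PROOFS =====

-- canonical "strip trailing zeros (all-zero ↦ [0])" on the reversed list, common target of both proofs
def pvTrimRev : List Int → List Int
  | [] => [0]
  | x :: xs => if x ≠ 0 then (x :: xs).reverse else pvTrimRev xs

lemma pvGoA_eq (f : List Int) : ∀ (l : List Int) (h : Nat),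
    f.reverse = List.replicate h 0 ++ l → pvGoA f l h = pvTrimRev l := by
  intro l
  induction l with
  | nil => intro h _; rfl
  | cons x xs ih =>
    intro h hf
    by_cases hx : x = 0
    · subst hx
      have hf' : f.reverse = List.replicate (h + 1) 0 ++ xs := by
        rw [hf, List.replicate_succ']; simp
      rw [show pvGoA f (0 :: xs) h = pvGoA f xs (h + 1) from by simp [pvGoA],
          show pvTrimRev (0 :: xs) = pvTrimRev xs from by simp [pvTrimRev]]
      exact ih (h + 1) hf'
    · have hfe : f = (x :: xs).reverse ++ List.replicate h 0 := by
        have := congrArg List.reverse hf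
        simpa using this
      simp only [pvGoA, pvTrimRev, if_pos hx]
      by_cases hh : h > 0
      · rw [if_pos hh, PySem.List.slice_to_neg_natCast f h hh, hfe]
        have hlen : ((x :: xs).reverse ++ List.replicate h 0).length - h
            = ((x :: xs).reverse).length := by
          simp only [List.length_append, List.length_reverse, List.length_cons,
            List.length_replicate]
          omega
        rw [hlen, List.take_left]
      · have h0 : h = 0 := by omega
        subst h0
        rw [if_neg hh, hfe]; simp

lemma remove_leading_zeros_eq_trim (f : List Int) :
    remove_leading_zeros f = pvTrimRev f.reverse := by
  unfold remove_leading_zeros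
  exact pvGoA_eq f f.reverse 0 (by simp)

-- canonical strip-trailing-zeros (all-zero ↦ [])
def pvT (xs : List Int) : List Int :=
  (xs.reverse.dropWhile (fun x => x == 0)).reverse

lemma pvT_append (l r : List Int) :
    pvT (l ++ r) = if pvT r = [] then pvT l else l ++ pvT r := by
  unfold pvT
  rw [List.reverse_append, List.dropWhile_append]
  by_cases h : (r.reverse.dropWhile (fun x => x == 0)) = []
  · simp [h]
  · simp [h, List.isEmpty_iff]

lemma pvStrip_succ (n : Nat) (xs : List Int) :
    pvStrip (n + 1) xs =
      (if xs.length ≤ 1 then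
        match xs with
        | [] => []
        | x :: _ => if x = 0 then [] else xs
      else
        let m := xs.length / 2
        let r := pvStrip n (xs.drop m)
        if r ≠ [] then xs.take m ++ r else pvStrip n (xs.take m)) := rfl

lemma pvStrip_eq_pvT : ∀ (n : Nat) (xs : List Int), xs.length ≤ n → pvStrip n xs = pvT xs := by
  intro n
  induction n with
  | zero =>
    intro xs h
    have : xs = [] := by cases xs <;> simp_all
    subst this; rfl
  | succ n ih =>
    intro xs hlen
    by_cases h1 : xs.length ≤ 1
    · rw [pvStrip_succ, if_pos h1]
      match xs, h1 with
      | [], _ => rfl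
      | [x], _ =>
        by_cases hx : x = 0 <;> simp [pvT, hx, List.dropWhile]
    · rw [pvStrip_succ, if_neg h1]
      have hlen2 : 2 ≤ xs.length := by omega
      set m := xs.length / 2 with hm
      have hmlb : 1 ≤ m := by omega
      have hmub : m < xs.length := by omega
      have hdrop : pvStrip n (xs.drop m) = pvT (xs.drop m) := by
        apply ih; simp only [List.length_drop]; omega
      have htake : pvStrip n (xs.take m) = pvT (xs.take m) := by
        apply ih; simp only [List.length_take]; omega
      have hsplit : xs.take m ++ xs.drop m = xs := List.take_append_drop m xs
      simp only [hdrop, htake]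
      rw [show pvT xs = pvT (xs.take m ++ xs.drop m) from by rw [hsplit],
          pvT_append]
      by_cases hr : pvT (xs.drop m) = []
      · simp [hr]
      · simp [hr]

lemma pvT_prefix (xs : List Int) : pvT xs <+: xs := by
  unfold pvT
  have h := List.takeWhile_append_dropWhile (p := fun x : Int => x == 0) (l := xs.reverse)
  have : xs = (xs.reverse.dropWhile (fun x => x == 0)).reverse
      ++ (xs.reverse.takeWhile (fun x => x == 0)).reverse := by
    conv_lhs => rw [← List.reverse_reverse xs, ← h]
    rw [List.reverse_append]
  exact ⟨_, this.symm⟩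

lemma pvTrimRev_eq (l : List Int) :
    pvTrimRev l = if l.dropWhile (fun x => x == 0) = [] then [0]
      else (l.dropWhile (fun x => x == 0)).reverse := by
  induction l with
  | nil => rfl
  | cons x xs ih =>
    by_cases hx : x = 0
    · subst hx
      simpa [pvTrimRev, List.dropWhile] using ih
    · have hb : (x == 0) = false := by simpa using hx
      simp [pvTrimRev, List.dropWhile, hx, hb]

lemma alt_eq_trim (f : List Int) :
    remove_leading_zeros_alt f = pvTrimRev f.reverse := by
  unfold remove_leading_zeros_alt
  rw [pvStrip_eq_pvT f.length f le_rfl, pvTrimRev_eq]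
  have hiff : pvT f = [] ↔ f.reverse.dropWhile (fun x => x == 0) = [] := by
    unfold pvT; simp
  by_cases h : pvT f = []
  · simp [h, hiff.mp h]
  · have hd : f.reverse.dropWhile (fun x => x == 0) ≠ [] := fun hc => h (hiff.mpr hc)
    rw [if_neg h, if_neg hd]
    have hrev : (f.reverse.dropWhile (fun x => x == 0)).reverse = pvT f := rfl
    rw [hrev]
    by_cases hl : (pvT f).length = f.length
    · rw [if_pos hl, (pvT_prefix f).eq_of_length hl]
    · rw [if_neg hl]

-- ===== VERDICT (by name: the statement is the Claim_ definition above) =====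
theorem remove_leading_zeros_spec : Claim_equal_remove_leading_zeros := by
  intro f _
  unfold Spec_remove_leading_zeros
  rw [remove_leading_zeros_eq_trim, alt_eq_trim]
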